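-- pv_equiv track=rewrite | github.com/lucanori/partita-bot | partita_bot/event_fetcher.py | _normalize_for_matching
-- ===== SOURCE A (Python) =====
-- def _normalize_for_matching(text: str) -> set[str]:
--     if not text:
--         return set()
--     normalized = text.lower()
--     for char in ",.-_()[]{}:;/\\|":
--         normalized = normalized.replace(char, " ")
--     tokens = normalized.split()
--     return set(tokens)
-- ===== SOURCE B (Python) =====
-- def _normalize_for_matching(text: str) -> set[str]:
--     separators = set(",.-_()[]{}:;/\\|")
--     result = set()
--     buf = []
--     for ch in text.lower():
--         if ch.isspace() or ch in separators:
--             if buf: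
--                 result.add("".join(buf))
--                 buf = []
--         else:
--             buf.append(ch)
--     if buf:
--         result.add("".join(buf))
--     return result
-- ===== Notes on version B (the rewrite author's own statement) =====
-- stated objective: alternative
-- what changed: Replaces 15 full replace() passes plus split() with a single-pass character tokenizer that flushes a buffer at whitespace/punctuation into the result set.
import Mathlib
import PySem

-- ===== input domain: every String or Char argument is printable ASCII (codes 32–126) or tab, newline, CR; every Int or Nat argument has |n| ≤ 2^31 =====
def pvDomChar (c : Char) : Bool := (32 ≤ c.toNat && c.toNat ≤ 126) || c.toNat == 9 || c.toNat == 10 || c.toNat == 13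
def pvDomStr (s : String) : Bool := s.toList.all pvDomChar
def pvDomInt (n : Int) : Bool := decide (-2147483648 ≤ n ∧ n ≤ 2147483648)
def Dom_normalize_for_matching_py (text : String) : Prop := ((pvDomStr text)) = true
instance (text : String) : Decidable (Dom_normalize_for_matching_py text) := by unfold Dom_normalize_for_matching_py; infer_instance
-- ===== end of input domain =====

-- B replaces A's 15 sequential replace() passes plus split() by one single-pass
-- character tokenizer flushing a buffer into the result set (equal return values).

-- ===== PORT A =====
def normalize_for_matching_py (text : String) : List String :=
  if text = "" then PySem.Set.empty
  else
    let normalized := PySem.Str.lower text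
    let normalized := ",.-_()[]{}:;/\\|".toList.foldl
      (fun s ch => PySem.Str.replace s (String.ofList [ch]) " ") normalized
    PySem.Set.ofList (PySem.Str.split₀ normalized)

-- ===== PORT B =====
def pvSeparators : PySem.Set Char := PySem.Set.ofList ",.-_()[]{}:;/\\|".toList

def pvFlush (res : PySem.Set String) (buf : List Char) : PySem.Set String :=
  if buf.isEmpty then res else PySem.Set.add res (String.ofList buf)

def pvTok : List Char → List Char → PySem.Set String → PySem.Set String
  | [], buf, res => pvFlush res buf
  | c :: cs, buf, res =>
    if PySem.Chars.isspace c || PySem.Set.contains pvSeparators c then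
      pvTok cs [] (pvFlush res buf)
    else
      pvTok cs (buf ++ [c]) res

def normalize_for_matching_py_alt (text : String) : List String :=
  pvTok (PySem.Chars.lower text.toList) [] PySem.Set.empty

-- ===== PRECONDITION & SPEC =====
def Spec_normalize_for_matching_py (text : String) (out : List String) : Prop := out = normalize_for_matching_py_alt text
instance (text : String) (out : List String) : Decidable (Spec_normalize_for_matching_py text out) := by unfold Spec_normalize_for_matching_py; infer_instance

-- ===== CLAIM (what is proved, stated in full; the proofs are below) =====
def Claim_equal_normalize_for_matching_py : Prop := ∀ (text : String), Dom_normalize_for_matching_py text → Spec_normalize_for_matching_py text (normalize_for_matching_py text)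

-- ===== LEMMAS AND PROOFS =====

def pvP : List Char := ",.-_()[]{}:;/\\|".toList

def pvSubst (c : Char) : Char := if pvP.contains c then ' ' else c

lemma pv_replace_go_single (a b : Char) :
    ∀ (l : List Char) (fuel : Nat) (acc : List Char), l.length ≤ fuel →
      PySem.Chars.replace.go [a] [b] fuel l acc
        = acc.reverse ++ l.map (fun x => if x == a then b else x) := by
  intro l
  induction l with
  | nil =>
      intro fuel acc _
      cases fuel <;> simp [PySem.Chars.replace.go]
  | cons c t ih =>
      intro fuel acc h
      cases fuel with
      | zero => simp at h
      | succ f =>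
        have hlen : t.length ≤ f := by simp at h; omega
        by_cases hc : c = a
        · subst hc
          have hpre : List.isPrefixOf [c] (c :: t) = true := by
            show (c == c && List.isPrefixOf [] t) = true; simp
          simp only [PySem.Chars.replace.go, hpre, if_true, List.length_cons,
            List.length_nil, Nat.zero_add, List.drop_succ_cons, List.drop_zero,
            List.map_cons, beq_self_eq_true]
          rw [ih f ([b].reverse ++ acc) hlen]
          simp
        · have hpre : List.isPrefixOf [a] (c :: t) = false := by
            show (a == c && List.isPrefixOf [] t) = false
            simp
            exact fun hh => hc hh.symm
          simp only [PySem.Chars.replace.go, hpre, Bool.false_eq_true, if_false,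
            List.map_cons]
          rw [ih f (c :: acc) hlen]
          have : (c == a) = false := by simpa using hc
          simp [this]

lemma pv_replace_single (a b : Char) (cs : List Char) :
    PySem.Chars.replace cs [a] [b] = cs.map (fun x => if x == a then b else x) := by
  simp only [PySem.Chars.replace, List.isEmpty]
  rw [pv_replace_go_single a b cs cs.length [] (le_refl _)]
  simp

lemma pv_foldl_replace (P : List Char) :
    ∀ cs : List Char,
      P.foldl (fun s c => PySem.Chars.replace s [c] [' ']) cs
        = cs.map (fun x => if P.contains x then ' ' else x) := by
  induction P with
  | nil => intro cs; simp
  | cons p P ih =>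
      intro cs
      simp only [List.foldl_cons]
      rw [pv_replace_single, ih, List.map_map]
      apply List.map_congr_left
      intro x _
      simp only [Function.comp, List.contains_cons]
      by_cases hx : x == p
      · simp [hx, ite_self]
      · simp [hx]

lemma pv_go_acc :
    ∀ (l cur : List (Char)) (a₁ a₂ : List (List Char)),
      PySem.Chars.split₀.go l cur (a₁ ++ a₂)
        = a₂.reverse ++ PySem.Chars.split₀.go l cur a₁ := by
  intro l
  induction l with
  | nil =>
      intro cur a₁ a₂
      by_cases h : cur.isEmpty <;> simp [PySem.Chars.split₀.go, h]
  | cons c rest ih =>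
      intro cur a₁ a₂
      by_cases hsp : PySem.Chars.isspace c
      · by_cases hc : cur.isEmpty
        · simp [PySem.Chars.split₀.go, hsp, hc, ih]
        · simp only [PySem.Chars.split₀.go, hsp, hc, if_true, if_false, Bool.false_eq_true]
          rw [show cur.reverse :: (a₁ ++ a₂) = (cur.reverse :: a₁) ++ a₂ by rfl, ih]
      · simp [PySem.Chars.split₀.go, hsp, ih]

lemma pv_contains_sep (c : Char) :
    PySem.Set.contains pvSeparators c = pvP.contains c := by
  have hset : pvSeparators = pvP := by decide
  rw [hset]; simp [PySem.Set.contains, List.contains_eq_mem]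

lemma pv_sep_subst (c : Char) :
    PySem.Chars.isspace (pvSubst c)
      = (PySem.Chars.isspace c || PySem.Set.contains pvSeparators c) := by
  rw [pv_contains_sep]
  by_cases h : c ∈ pvP
  · simp [pvSubst, List.contains_eq_mem, h,
      show PySem.Chars.isspace ' ' = true by decide]
  · simp [pvSubst, List.contains_eq_mem, h]

lemma pv_subst_eq_of_not_sep (c : Char)
    (h : (PySem.Chars.isspace c || PySem.Set.contains pvSeparators c) = false) :
    pvSubst c = c := by
  rw [pv_contains_sep] at h
  simp only [Bool.or_eq_false_iff] at h
  have h2 : ¬ c ∈ pvP := by simpa [List.contains_eq_mem] using h.2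
  simp [pvSubst, List.contains_eq_mem, h2]

lemma pv_tok_main :
    ∀ (cs buf : List Char) (res : PySem.Set String),
      pvTok cs buf res
        = List.foldl (fun s t => PySem.Set.add s (String.ofList t)) res
            (PySem.Chars.split₀.go (cs.map pvSubst) buf.reverse []) := by
  intro cs
  induction cs with
  | nil =>
      intro buf res
      by_cases h : buf.isEmpty
      · have : buf = [] := by simpa using h
        subst this
        simp [pvTok, pvFlush, PySem.Chars.split₀.go]
      · simp [pvTok, pvFlush, h, PySem.Chars.split₀.go]
  | cons c rest ih =>
      intro buf res
      by_cases hsep : (PySem.Chars.isspace c || PySem.Set.contains pvSeparators c)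
      · have hsub : PySem.Chars.isspace (pvSubst c) = true := by
          rw [pv_sep_subst]; exact hsep
        by_cases hb : buf.isEmpty
        · have : buf = [] := by simpa using hb
          subst this
          simp only [pvTok, hsep, pvFlush, List.isEmpty_nil, if_true]
          rw [ih]
          simp [PySem.Chars.split₀.go, hsub]
        · have hbr : buf.reverse.isEmpty = false := by simpa using hb
          simp only [pvTok, hsep, pvFlush, hb, Bool.false_eq_true, if_false]
          rw [ih]
          simp only [List.map_cons, PySem.Chars.split₀.go, hsub, hbr, if_true,
            Bool.false_eq_true, if_false]
          rw [show ([buf.reverse.reverse] : List (List Char)) = [] ++ [buf.reverse.reverse] by rfl,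
            pv_go_acc]
          simp
      · have hc : pvSubst c = c := pv_subst_eq_of_not_sep c (by simpa using hsep)
        have hsub : PySem.Chars.isspace (pvSubst c) = false := by
          rw [pv_sep_subst]; simpa using hsep
        have hs2 : PySem.Chars.isspace c = false := by rw [← hc]; exact hsub
        simp only [pvTok, hsep, Bool.false_eq_true, if_false]
        rw [ih]
        simp [PySem.Chars.split₀.go, hs2, hc]

lemma pv_foldl_str (P : List Char) :
    ∀ s : String,
      (P.foldl (fun s ch => PySem.Str.replace s (String.ofList [ch]) " ") s).toList
        = P.foldl (fun cs ch => PySem.Chars.replace cs [ch] [' ']) s.toList := by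
  induction P with
  | nil => intro s; simp
  | cons p P ih =>
      intro s
      simp only [List.foldl_cons]
      rw [ih]
      congr 1
      rw [PySem.Str.toList_replace]
      simp

-- ===== VERDICT (by name: the statement is the Claim_ definition above) =====
theorem normalize_for_matching_py_spec : Claim_equal_normalize_for_matching_py := by
  intro text _
  unfold Spec_normalize_for_matching_py
  by_cases h : text = ""
  · subst h; rfl
  · have hnorm :
        (",.-_()[]{}:;/\\|".toList.foldl
            (fun s ch => PySem.Str.replace s (String.ofList [ch]) " ")
            (PySem.Str.lower text)).toList
          = (PySem.Chars.lower text.toList).map pvSubst := by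
      rw [pv_foldl_str, pv_foldl_replace, PySem.Str.toList_lower]
      rfl
    have hA : normalize_for_matching_py text
        = PySem.Set.ofList (PySem.Str.split₀
            (",.-_()[]{}:;/\\|".toList.foldl
              (fun s ch => PySem.Str.replace s (String.ofList [ch]) " ")
              (PySem.Str.lower text))) := by
      simp [normalize_for_matching_py, h]
    rw [hA]
    unfold normalize_for_matching_py_alt
    rw [pv_tok_main]
    simp only [PySem.Str.split₀]
    rw [PySem.Set.ofList_eq_foldl, List.foldl_map, hnorm]
    rfl
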